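-- pv_equiv track=rewrite | github.com/khelwood/advent-of-code | 2022/d16_volcanium.py | calculate_flow
-- ===== SOURCE A (Python) =====
-- def calculate_flow(route, dists, flows, mins, cache):
--     if route in cache:
--         return cache[route]
--     pos = 'AA'
--     flow = 0
--     for new in route:
--         d = dists[pos,new]
--         mins -= d + 1
--         flow += flows[new]*mins
--         pos = new
--     cache[route] = flow
--     return flow
-- ===== SOURCE B (Python) =====
-- def calculate_flow(route, dists, flows, mins, cache):
--     if route in cache:
--         return cache[route]
--     # pass 1: cumulative times at which each valve on the route is opened
--     times = []
--     t = 0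
--     pos = 'AA'
--     for new in route:
--         t += dists[pos, new] + 1
--         times.append(t)
--         pos = new
--     # pass 2: a valve v opened at time tv releases flows[v] * (mins - tv)
--     flow = sum(flows[v] * (mins - tv) for v, tv in zip(route, times))
--     cache[route] = flow
--     return flow
-- ===== Notes on version B (the rewrite author's own statement) =====
-- stated objective: alternative
-- what changed: Instead of A's single loop mutating mins and accumulating flow together, B first builds a prefix table of cumulative opening times and then sums flows[v]*(mins - t) over the zipped route/times in a separate pass.
import Mathlib
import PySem

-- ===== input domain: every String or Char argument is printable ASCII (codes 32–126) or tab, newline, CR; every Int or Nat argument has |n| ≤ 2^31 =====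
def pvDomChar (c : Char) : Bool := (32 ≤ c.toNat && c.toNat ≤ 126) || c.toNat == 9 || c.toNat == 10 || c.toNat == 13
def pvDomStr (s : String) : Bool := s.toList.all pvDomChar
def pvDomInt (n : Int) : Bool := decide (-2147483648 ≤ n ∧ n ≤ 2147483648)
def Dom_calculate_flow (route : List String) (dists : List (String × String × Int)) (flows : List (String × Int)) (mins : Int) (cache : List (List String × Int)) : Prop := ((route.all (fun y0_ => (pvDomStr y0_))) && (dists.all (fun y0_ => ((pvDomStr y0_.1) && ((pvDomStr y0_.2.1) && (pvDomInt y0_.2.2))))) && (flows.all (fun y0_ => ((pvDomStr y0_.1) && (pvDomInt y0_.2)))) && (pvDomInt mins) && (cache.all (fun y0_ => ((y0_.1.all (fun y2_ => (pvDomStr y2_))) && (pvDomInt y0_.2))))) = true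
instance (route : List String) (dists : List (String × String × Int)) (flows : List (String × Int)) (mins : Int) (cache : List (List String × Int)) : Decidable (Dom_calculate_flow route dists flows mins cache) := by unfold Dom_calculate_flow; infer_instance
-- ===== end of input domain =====

-- B replaces A's single mins-mutating loop by a prefix table of opening times plus a separate
-- summation pass (alternative decomposition, same cost). Both Pythons store the result into the
-- caller's cache dict identically; the theorems below are about the RETURN value only.


-- shared primitive: first-match lookup in `dists` keyed by the pair (pos, new) — Python dict lookup dists[pos,new]
def distGet? (dists : List (String × String × Int)) (p n : String) : Option Int :=
  match dists with
  | [] => none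
  | (a, b, v) :: rest => if a == p && b == n then some v else distGet? rest p n

-- ===== PORT A =====
-- A's loop: state (pos, mins, flow); none = KeyError (excluded by Pre_)
def flowLoopA (route : List String) (dists : List (String × String × Int)) (flows : List (String × Int)) (pos : String) (mins flow : Int) : Option Int :=
  match route with
  | [] => some flow
  | new :: rest =>
    match distGet? dists pos new with
    | none => none
    | some d =>
      match PySem.Dict.get? (PySem.Dict.mk flows) new with
      | none => none
      | some f => flowLoopA rest dists flows new (mins - (d + 1)) (flow + f * (mins - (d + 1)))

def calculate_flow (route : List String) (dists : List (String × String × Int)) (flows : List (String × Int)) (mins : Int) (cache : List (List String × Int)) : Int :=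
  match PySem.Dict.get? (PySem.Dict.mk cache) route with
  | some v => v
  | none => (flowLoopA route dists flows "AA" mins 0).getD 0   -- getD 0 is unreachable inside Pre_

-- ===== PORT B =====
-- pass 1 of Source B: the list of cumulative opening times; none = KeyError (excluded by Pre_)
def timesLoop (route : List String) (dists : List (String × String × Int)) (pos : String) (t : Int) : Option (List Int) :=
  match route with
  | [] => some []
  | new :: rest =>
    match distGet? dists pos new with
    | none => none
    | some d =>
      match timesLoop rest dists new (t + (d + 1)) with
      | none => none
      | some ts => some ((t + (d + 1)) :: ts)

-- pass 2 of Source B: sum of flows[v]*(mins - tv) over the zipped pairs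
def sumFlow (pairs : List (String × Int)) (flows : List (String × Int)) (mins : Int) : Option Int :=
  match pairs with
  | [] => some 0
  | (v, tv) :: rest =>
    match PySem.Dict.get? (PySem.Dict.mk flows) v with
    | none => none
    | some f =>
      match sumFlow rest flows mins with
      | none => none
      | some s => some (f * (mins - tv) + s)

def calculate_flow_alt (route : List String) (dists : List (String × String × Int)) (flows : List (String × Int)) (mins : Int) (cache : List (List String × Int)) : Int :=
  match PySem.Dict.get? (PySem.Dict.mk cache) route with
  | some v => v
  | none =>
    (match timesLoop route dists "AA" 0 with
     | none => none
     | some ts => sumFlow (route.zip ts) flows mins).getD 0   -- getD 0 is unreachable inside Pre_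

-- ===== PRECONDITION & SPEC =====
-- Pre_ excludes exactly the inputs where Python A raises KeyError: the route is not cached and
-- some consecutive pair lacks a dists entry or some route valve lacks a flows entry.
def Pre_calculate_flow (route : List String) (dists : List (String × String × Int)) (flows : List (String × Int)) (mins : Int) (cache : List (List String × Int)) : Prop :=
  route ∈ cache.map (·.1) ∨
  ((("AA" :: route).zip route).all (fun p => dists.any (fun e => e.1 == p.1 && e.2.1 == p.2)) = true ∧
   route.all (fun v => v ∈ flows.map (·.1)) = true)
instance (route : List String) (dists : List (String × String × Int)) (flows : List (String × Int)) (mins : Int) (cache : List (List String × Int)) : Decidable (Pre_calculate_flow route dists flows mins cache) := by unfold Pre_calculate_flow; infer_instance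

def pvWitness_calculate_flow : List String × (List (String × String × Int)) × (List (String × Int)) × Int × (List (List String × Int)) :=
  (["BB", "CC"], [("AA", "BB", 2), ("BB", "CC", 3)], [("BB", 13), ("CC", 5)], 30, [])

def Spec_calculate_flow (route : List String) (dists : List (String × String × Int)) (flows : List (String × Int)) (mins : Int) (cache : List (List String × Int)) (out : Int) : Prop := out = calculate_flow_alt route dists flows mins cache
instance (route : List String) (dists : List (String × String × Int)) (flows : List (String × Int)) (mins : Int) (cache : List (List String × Int)) (out : Int) : Decidable (Spec_calculate_flow route dists flows mins cache out) := by unfold Spec_calculate_flow; infer_instance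

-- ===== CLAIM (what is proved, stated in full; the proofs are below) =====
def Claim_equal_calculate_flow : Prop := ∀ (route : List String) (dists : List (String × String × Int)) (flows : List (String × Int)) (mins : Int) (cache : List (List String × Int)), Dom_calculate_flow route dists flows mins cache → Pre_calculate_flow route dists flows mins cache → Spec_calculate_flow route dists flows mins cache (calculate_flow route dists flows mins cache)

-- ===== LEMMAS AND PROOFS =====

-- invariant: A's running loop at elapsed time t equals B's times table + summation, shifted by flow
theorem flowLoopA_eq (route : List String) (dists : List (String × String × Int)) (flows : List (String × Int)) (M : Int) :
    ∀ (pos : String) (t flow : Int),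
      flowLoopA route dists flows pos (M - t) flow =
        (match timesLoop route dists pos t with
         | none => none
         | some ts => (sumFlow (route.zip ts) flows M).map (flow + ·)) := by
  induction route with
  | nil => intro pos t flow; simp [flowLoopA, timesLoop, sumFlow, List.zip]
  | cons new rest ih =>
    intro pos t flow
    simp only [flowLoopA, timesLoop]
    cases hd : distGet? dists pos new with
    | none => simp
    | some d =>
      cases hf : PySem.Dict.get? (PySem.Dict.mk flows) new with
      | none =>
        simp only
        cases ht : timesLoop rest dists new (t + (d + 1)) with
        | none => simp
        | some ts => simp [List.zip_cons_cons, sumFlow, hf]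
      | some f =>
        simp only
        have hmins : M - t - (d + 1) = M - (t + (d + 1)) := by ring
        rw [hmins, ih new (t + (d + 1))]
        cases ht : timesLoop rest dists new (t + (d + 1)) with
        | none => simp
        | some ts =>
          simp only [List.zip_cons_cons, sumFlow, hf]
          cases hs : sumFlow (rest.zip ts) flows M with
          | none => simp
          | some s => simp [Option.map]; ring

theorem calculate_flow_spec : Claim_equal_calculate_flow := by
  intro route dists flows mins cache _ _
  unfold Spec_calculate_flow calculate_flow calculate_flow_alt
  cases hc : PySem.Dict.get? (PySem.Dict.mk cache) route with
  | some v => rfl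
  | none =>
    have h := flowLoopA_eq route dists flows mins "AA" 0 0
    rw [show mins - 0 = mins by ring] at h
    rw [h]
    cases ht : timesLoop route dists "AA" 0 with
    | none => simp
    | some ts =>
      cases hs : sumFlow (route.zip ts) flows mins with
      | none => simp [hs]
      | some s => simp [hs]
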